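-- pv_equiv track=rewrite | github.com/ruarfff/aoc-2024 | src/day7/day7.py | check_prod_or_sum_backtracking
-- ===== SOURCE A (Python) =====
-- def check_prod_or_sum_backtracking(numbers, target):
--     def evaluate(nums, operators):
--         result = nums[0]
--         for i in range(len(operators)):
--             if operators[i] == '+':
--                 result += nums[i + 1]
--             elif operators[i] == '*':
--                 result *= nums[i + 1]
--         return result
--
--     def generate_operator_combinations(cur_len):
--         operators = ['+', '*']
--         combinations = []
--
--         def backtrack(curr):
--             if len(curr) == cur_len:
--                 combinations.append(curr[:])  # Create a copy of the current combination
--                 return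
--
--             for op in operators:
--                 curr.append(op)
--                 backtrack(curr)
--                 curr.pop()
--
--         backtrack([])
--         return combinations
--
--     num_operators = len(numbers) - 1
--     operator_combinations = generate_operator_combinations(num_operators)
--     solutions = []
--
--     for operators in operator_combinations:
--         result = evaluate(numbers, operators)
--         if result == target:
--             expression = str(numbers[0])
--             for i in range(len(operators)):
--                 expression += f" {operators[i]} {numbers[i + 1]}"
--             solutions.append(expression)
--
--     return solutions
-- ===== SOURCE B (Python) =====
-- def check_prod_or_sum_backtracking(numbers, target):
--     def dfs(rest, value, expr):
--         if not rest:
--             return [expr] if value == target else []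
--         n = rest[0]
--         tail = rest[1:]
--         return (dfs(tail, value + n, f"{expr} + {n}")
--                 + dfs(tail, value * n, f"{expr} * {n}"))
--
--     return dfs(numbers[1:], numbers[0], str(numbers[0]))
-- ===== Notes on version B (the rewrite author's own statement) =====
-- stated objective: faster
-- what changed: Instead of materializing all 2^(n-1) operator combinations via backtracking and then re-evaluating each full expression and rebuilding its string from scratch, B does a single recursive DFS over the numbers that carries the running value and the expression string incrementally, emitting matches in the same '+'-before-'*' order.
import Mathlib
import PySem

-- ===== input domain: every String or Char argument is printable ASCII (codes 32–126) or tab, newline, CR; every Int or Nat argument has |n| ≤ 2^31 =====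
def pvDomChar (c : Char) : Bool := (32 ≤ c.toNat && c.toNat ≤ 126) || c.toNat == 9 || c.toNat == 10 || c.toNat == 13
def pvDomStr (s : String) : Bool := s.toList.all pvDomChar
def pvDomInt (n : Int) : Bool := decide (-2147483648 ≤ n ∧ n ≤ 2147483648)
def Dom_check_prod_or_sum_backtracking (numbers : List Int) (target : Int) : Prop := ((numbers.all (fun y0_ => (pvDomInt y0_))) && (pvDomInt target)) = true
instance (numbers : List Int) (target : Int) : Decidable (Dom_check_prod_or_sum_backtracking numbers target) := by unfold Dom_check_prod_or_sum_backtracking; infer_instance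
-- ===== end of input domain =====

-- B replaces A's materialize-all-combinations-then-re-evaluate scheme with one recursive DFS
-- carrying the running value and the expression string incrementally (same solution order).

-- ===== PORT A =====
-- backtrack(curr) of generate_operator_combinations, recursing on the number of
-- operator slots still to fill (len(curr) grows by 1 per call until cur_len).
def pvBacktrackA (remaining : Nat) (curr : List String) : List (List String) :=
  match remaining with
  | 0 => [curr]
  | k + 1 => pvBacktrackA k (curr ++ ["+"]) ++ pvBacktrackA k (curr ++ ["*"])

-- evaluate(nums, operators): index loop over range(len(operators))
def pvEvaluateA (nums : List Int) (ops : List String) : Int :=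
  (PySem.List.pyRange 0 (ops.length : Int) 1).foldl
    (fun result i =>
      if PySem.List.pyGetD ops i "" = "+" then result + PySem.List.pyGetD nums (i + 1) 0
      else if PySem.List.pyGetD ops i "" = "*" then result * PySem.List.pyGetD nums (i + 1) 0
      else result)
    (PySem.List.pyGetD nums 0 0)

-- the expression-building index loop of the main function
def pvExprA (nums : List Int) (ops : List String) : String :=
  (PySem.List.pyRange 0 (ops.length : Int) 1).foldl
    (fun e i =>
      e ++ " " ++ PySem.List.pyGetD ops i "" ++ " " ++ PySem.Int.toStr (PySem.List.pyGetD nums (i + 1) 0))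
    (PySem.Int.toStr (PySem.List.pyGetD nums 0 0))

def check_prod_or_sum_backtracking (numbers : List Int) (target : Int) : List String :=
  let operator_combinations := pvBacktrackA (numbers.length - 1) []
  operator_combinations.foldl
    (fun solutions operators =>
      if pvEvaluateA numbers operators = target
      then solutions ++ [pvExprA numbers operators]
      else solutions)
    []

-- ===== PORT B =====
def pvDfsB (target : Int) (rest : List Int) (value : Int) (expr : String) : List String :=
  match rest with
  | [] => if value = target then [expr] else []
  | n :: tail =>
      pvDfsB target tail (value + n) (expr ++ " + " ++ PySem.Int.toStr n) ++
      pvDfsB target tail (value * n) (expr ++ " * " ++ PySem.Int.toStr n)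

def check_prod_or_sum_backtracking_alt (numbers : List Int) (target : Int) : List String :=
  match numbers with
  | [] => []  -- B raises IndexError on [] (excluded by Pre_)
  | n :: rest => pvDfsB target rest n (PySem.Int.toStr n)

-- ===== PRECONDITION & SPEC =====
-- On numbers = [] the Python A recurses forever (RecursionError: cur_len = -1), and B raises IndexError.
def Pre_check_prod_or_sum_backtracking (numbers : List Int) (target : Int) : Prop := numbers ≠ []
instance (numbers : List Int) (target : Int) : Decidable (Pre_check_prod_or_sum_backtracking numbers target) := by unfold Pre_check_prod_or_sum_backtracking; infer_instance

def pvWitness_check_prod_or_sum_backtracking : List Int × Int := ([1, 2, 3], 9)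

def Spec_check_prod_or_sum_backtracking (numbers : List Int) (target : Int) (out : List String) : Prop := out = check_prod_or_sum_backtracking_alt numbers target
instance (numbers : List Int) (target : Int) (out : List String) : Decidable (Spec_check_prod_or_sum_backtracking numbers target out) := by unfold Spec_check_prod_or_sum_backtracking; infer_instance

-- ===== CLAIM (what is proved, stated in full; the proofs are below) =====
def Claim_equal_check_prod_or_sum_backtracking : Prop := ∀ (numbers : List Int) (target : Int), Dom_check_prod_or_sum_backtracking numbers target → Pre_check_prod_or_sum_backtracking numbers target → Spec_check_prod_or_sum_backtracking numbers target (check_prod_or_sum_backtracking numbers target)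

-- ===== LEMMAS AND PROOFS =====

-- all operator suffixes of length k, '+' branch first (A's enumeration order)
def pvSuffixes : Nat → List (List String)
  | 0 => [[]]
  | k + 1 => (pvSuffixes k).map (fun s => "+" :: s) ++ (pvSuffixes k).map (fun s => "*" :: s)

lemma pvBacktrackA_eq (k : Nat) : ∀ curr, pvBacktrackA k curr = (pvSuffixes k).map (fun s => curr ++ s) := by
  induction k with
  | zero => intro curr; simp [pvBacktrackA, pvSuffixes]
  | succ k ih =>
      intro curr
      simp [pvBacktrackA, pvSuffixes, ih, List.map_map, Function.comp_def]

lemma pvSuffixes_length {k : Nat} {ops : List String} (h : ops ∈ pvSuffixes k) : ops.length = k := by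
  induction k generalizing ops with
  | zero => simp [pvSuffixes] at h; simp [h]
  | succ k ih =>
      simp [pvSuffixes] at h
      rcases h with ⟨s, hs, rfl⟩ | ⟨s, hs, rfl⟩ <;> simp [ih hs]

-- an index fold over ops[i], nums[i+1] (nums = n0 :: tail) is a fold over ops.zip tail
lemma pvFoldIdx {γ : Type} (f : γ → String → Int → γ) (ops : List String) (n0 : Int)
    (tail : List Int) (h : ops.length = tail.length) (init : γ) :
    (PySem.List.pyRange 0 (ops.length : Int) 1).foldl
      (fun r i => f r (PySem.List.pyGetD ops i "") (PySem.List.pyGetD (n0 :: tail) (i + 1) 0)) init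
    = (ops.zip tail).foldl (fun r p => f r p.1 p.2) init := by
  have hmap : (PySem.List.pyRange 0 (ops.length : Int) 1).map
      (fun i => (PySem.List.pyGetD ops i "", PySem.List.pyGetD (n0 :: tail) (i + 1) 0))
      = ops.zip tail := by
    apply List.ext_getElem
    · simp [PySem.List.length_pyRange_one, h]
    · intro k h1 h2
      have hk : k < ops.length := by
        simpa [PySem.List.length_pyRange_one] using h1
      have hk' : k < tail.length := h ▸ hk
      rw [List.getElem_map, PySem.List.getElem_pyRange_one]
      rw [List.getElem_zip]
      have e1 : PySem.List.pyGetD ops (0 + (k : Int)) "" = ops[k] := by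
        rw [PySem.List.pyGetD_eq_getElem ops "" (by omega) (by exact_mod_cast by omega)]
        congr 1
        omega
      have e2 : PySem.List.pyGetD (n0 :: tail) (0 + (k : Int) + 1) 0 = tail[k] := by
        rw [PySem.List.pyGetD_eq_getElem (n0 :: tail) 0 (by omega)
          (by simp; exact_mod_cast by omega)]
        simp
      rw [e1, e2]
  calc (PySem.List.pyRange 0 (ops.length : Int) 1).foldl
        (fun r i => f r (PySem.List.pyGetD ops i "") (PySem.List.pyGetD (n0 :: tail) (i + 1) 0)) init
      = ((PySem.List.pyRange 0 (ops.length : Int) 1).map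
          (fun i => (PySem.List.pyGetD ops i "", PySem.List.pyGetD (n0 :: tail) (i + 1) 0))).foldl
          (fun r p => f r p.1 p.2) init := by
        rw [List.foldl_map]
    _ = (ops.zip tail).foldl (fun r p => f r p.1 p.2) init := by rw [hmap]

-- zip-fold forms of A's evaluate / expression builder
def pvZEval (value : Int) (tail : List Int) (ops : List String) : Int :=
  (ops.zip tail).foldl
    (fun r p => if p.1 = "+" then r + p.2 else if p.1 = "*" then r * p.2 else r) value

def pvZExpr (expr : String) (tail : List Int) (ops : List String) : String :=
  (ops.zip tail).foldl (fun e p => e ++ " " ++ p.1 ++ " " ++ PySem.Int.toStr p.2) expr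

lemma pvEvaluateA_eq (n0 : Int) (tail : List Int) (ops : List String) (h : ops.length = tail.length) :
    pvEvaluateA (n0 :: tail) ops = pvZEval n0 tail ops := by
  unfold pvEvaluateA pvZEval
  rw [show PySem.List.pyGetD (n0 :: tail) 0 0 = n0 from PySem.List.pyGetD_zero_cons n0 tail 0]
  exact pvFoldIdx (fun r o m => if o = "+" then r + m else if o = "*" then r * m else r)
    ops n0 tail h n0

lemma pvExprA_eq (n0 : Int) (tail : List Int) (ops : List String) (h : ops.length = tail.length) :
    pvExprA (n0 :: tail) ops = pvZExpr (PySem.Int.toStr n0) tail ops := by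
  unfold pvExprA pvZExpr
  rw [show PySem.List.pyGetD (n0 :: tail) 0 0 = n0 from PySem.List.pyGetD_zero_cons n0 tail 0]
  exact pvFoldIdx (fun e o m => e ++ " " ++ o ++ " " ++ PySem.Int.toStr m)
    ops n0 tail h (PySem.Int.toStr n0)

-- main invariant: B's DFS computes exactly A's filter-then-print over all suffixes
lemma pvDfsB_eq (target : Int) : ∀ (tail : List Int) (value : Int) (expr : String),
    pvDfsB target tail value expr
    = ((pvSuffixes tail.length).filter (fun ops => decide (pvZEval value tail ops = target))).map
        (pvZExpr expr tail) := by
  intro tail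
  induction tail with
  | nil =>
      intro value expr
      by_cases h : value = target <;> simp [pvDfsB, pvSuffixes, pvZEval, pvZExpr, h]
  | cons n tl ih =>
      intro value expr
      have hzplus : ∀ s : List String, pvZEval value (n :: tl) ("+" :: s) = pvZEval (value + n) tl s := by
        intro s; simp [pvZEval]
      have hzstar : ∀ s : List String, pvZEval value (n :: tl) ("*" :: s) = pvZEval (value * n) tl s := by
        intro s; simp [pvZEval]
      have heplus : ∀ s : List String,
          pvZExpr expr (n :: tl) ("+" :: s) = pvZExpr (expr ++ " + " ++ PySem.Int.toStr n) tl s := by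
        intro s
        simp only [pvZExpr, List.zip_cons_cons, List.foldl_cons]
        congr 1
        simp [String.append_assoc]
      have hestar : ∀ s : List String,
          pvZExpr expr (n :: tl) ("*" :: s) = pvZExpr (expr ++ " * " ++ PySem.Int.toStr n) tl s := by
        intro s
        simp only [pvZExpr, List.zip_cons_cons, List.foldl_cons]
        congr 1
        simp [String.append_assoc]
      have hfplus : (pvZExpr expr (n :: tl)) ∘ (fun s => "+" :: s)
          = pvZExpr (expr ++ " + " ++ PySem.Int.toStr n) tl := funext heplus
      have hfstar : (pvZExpr expr (n :: tl)) ∘ (fun s => "*" :: s)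
          = pvZExpr (expr ++ " * " ++ PySem.Int.toStr n) tl := funext hestar
      have hpplus : ((fun ops => decide (pvZEval value (n :: tl) ops = target)) ∘ (fun s => "+" :: s))
          = (fun s => decide (pvZEval (value + n) tl s = target)) :=
        funext fun s => by simp [Function.comp, hzplus s]
      have hpstar : ((fun ops => decide (pvZEval value (n :: tl) ops = target)) ∘ (fun s => "*" :: s))
          = (fun s => decide (pvZEval (value * n) tl s = target)) :=
        funext fun s => by simp [Function.comp, hzstar s]
      simp only [pvDfsB, List.length_cons, pvSuffixes, List.filter_append, List.map_append,
        List.filter_map, List.map_map, hpplus, hpstar, hfplus, hfstar, ih]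

-- ===== VERDICT (by name: the statement is the Claim_ definition above) =====
theorem check_prod_or_sum_backtracking_spec : Claim_equal_check_prod_or_sum_backtracking := by
  intro numbers target _ hpre
  match numbers with
  | [] => exact absurd rfl hpre
  | n0 :: tail =>
      show check_prod_or_sum_backtracking (n0 :: tail) target
        = check_prod_or_sum_backtracking_alt (n0 :: tail) target
      have hA : check_prod_or_sum_backtracking (n0 :: tail) target
          = List.foldl
              (fun solutions operators =>
                if pvEvaluateA (n0 :: tail) operators = target
                then solutions ++ [pvExprA (n0 :: tail) operators]
                else solutions)
              [] (pvBacktrackA tail.length []) := rfl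
      have hB : check_prod_or_sum_backtracking_alt (n0 :: tail) target
          = pvDfsB target tail n0 (PySem.Int.toStr n0) := rfl
      rw [hA, hB, pvBacktrackA_eq, pvDfsB_eq]
      simp only [List.nil_append, List.map_id']
      have hfold := PySem.List.foldl_append_if
        (fun ops => decide (pvEvaluateA (n0 :: tail) ops = target))
        (pvExprA (n0 :: tail)) (pvSuffixes tail.length) []
      simp only [decide_eq_true_eq, List.nil_append] at hfold
      rw [hfold]
      have hfilter : List.filter (fun ops => decide (pvEvaluateA (n0 :: tail) ops = target))
            (pvSuffixes tail.length)
          = List.filter (fun ops => decide (pvZEval n0 tail ops = target)) (pvSuffixes tail.length) := by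
        apply List.filter_congr
        intro ops hops
        rw [pvEvaluateA_eq n0 tail ops (pvSuffixes_length hops)]
      rw [hfilter]
      apply List.map_congr_left
      intro ops hops
      exact pvExprA_eq n0 tail ops (pvSuffixes_length (List.mem_of_mem_filter hops))
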